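-- pv_equiv track=rewrite | github.com/AdaSawilska/NLP_iSTS | predictions_to_wa.py | get_indices_from_words
-- ===== SOURCE A (Python) =====
-- def get_indices_from_words(word_string, token_map):
--     """Get indices for words in the order they appear."""
--
--     words = str(word_string).split()
--     current_position = 1
--     indices = []
--
--     for word in words:
--         while current_position <= max(token_map.keys()):
--             if token_map.get(current_position) == word:
--                 indices.append(str(current_position))
--                 current_position += 1
--                 break
--             current_position += 1
--
--     if len(indices) == 0:
--         indices = "0"
--     return " ".join(indices)
-- ===== SOURCE B (Python) =====
-- def get_indices_from_words(word_string, token_map):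
--     """Get indices for words in the order they appear (inverted-index version)."""
--     words = str(word_string).split()
--     if not words:
--         return "0"
--     max_key = max(token_map.keys())
--     index = {}
--     for k, v in sorted(token_map.items()):
--         index.setdefault(v, []).append(k)
--     out = []
--     cur = 1
--     for w in words:
--         found = None
--         for p in index.get(w, ()):
--             if p >= cur:
--                 found = p
--                 break
--         if found is None:
--             cur = max_key + 1
--         else:
--             out.append(str(found))
--             cur = found + 1
--     return " ".join(out) if out else "0"
-- ===== Notes on version B (the rewrite author's own statement) =====
-- stated objective: faster
-- what changed: Replaces A's per-word forward scan, which re-evaluates max(token_map.keys()) at every position it passes and probes the dict position by position, with an inverted index word -> ascending list of key positions built once, so each word is answered by taking the first indexed position >= the cursor.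
import Mathlib
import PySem

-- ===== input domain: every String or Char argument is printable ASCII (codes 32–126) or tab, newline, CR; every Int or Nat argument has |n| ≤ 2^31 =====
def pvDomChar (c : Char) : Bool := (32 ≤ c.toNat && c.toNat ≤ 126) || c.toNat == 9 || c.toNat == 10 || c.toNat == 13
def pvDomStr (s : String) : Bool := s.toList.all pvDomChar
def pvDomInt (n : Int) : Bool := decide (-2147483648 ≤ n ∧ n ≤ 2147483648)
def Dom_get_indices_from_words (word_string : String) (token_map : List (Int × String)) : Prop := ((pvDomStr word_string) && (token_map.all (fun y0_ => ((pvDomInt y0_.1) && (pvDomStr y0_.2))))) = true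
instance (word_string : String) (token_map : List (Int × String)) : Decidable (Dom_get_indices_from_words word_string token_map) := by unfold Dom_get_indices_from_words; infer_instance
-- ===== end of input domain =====

-- B replaces A's per-word cursor scan (which re-evaluates max(token_map.keys()) at every
-- position it passes) by an inverted index word → ascending key positions, built once: faster.

-- ===== PORT A =====
-- max(token_map.keys()); both Pythons contain this exact expression.  getD 0 is only a
-- totality default: Pre_ guarantees the expression is never reached on an empty dict.
def pvMaxKey (tm : List (Int × String)) : Int :=
  (PySem.List.max? (PySem.Dict.mk tm).keys (fun x => x)).getD 0

-- A's inner while loop: scan positions cur, cur+1, … while ≤ mx; on a hit return (cur+1, hit).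
def pvScanA (tm : List (Int × String)) (mx : Int) (w : String) (cur : Int) : Int × Option Int :=
  if cur ≤ mx then
    if (PySem.Dict.mk tm).get? cur = some w then (cur + 1, some cur)
    else pvScanA tm mx w (cur + 1)
  else (cur, none)
termination_by (mx + 1 - cur).toNat
decreasing_by omega

-- A's loop body for one word: run the scan from the current cursor, append str(hit) on a hit.
def pvStepA (tm : List (Int × String)) (st : Int × List String) (w : String) : Int × List String :=
  match pvScanA tm (pvMaxKey tm) w st.1 with
  | (cur', some p) => (cur', st.2 ++ [PySem.Int.toStr p])
  | (cur', none)   => (cur', st.2)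

def get_indices_from_words (word_string : String) (token_map : List (Int × String)) : String :=
  let words := PySem.Str.split₀ word_string
  let st := words.foldl (pvStepA token_map) (1, [])
  if st.2.length = 0 then "0" else PySem.Str.join " " st.2

-- ===== PORT B =====
-- token_map.items() of the association list under the first-match dict convention
-- (first occurrence of each key; exact model of iterating the Python dict's items).
def pvItems : List (Int × String) → List (Int × String)
  | [] => []
  | (k, v) :: rest => (k, v) :: pvItems (rest.filter (fun p => p.1 != k))
termination_by tm => tm.length
decreasing_by simpa using Nat.lt_succ_of_le (List.length_filter_le _ rest.attach)

-- Source B: for k, v in sorted(token_map.items()): index.setdefault(v, []).append(k)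
-- (keys are distinct, so sorting the pairs lexicographically is sorting by key)
def pvIndex (tm : List (Int × String)) : PySem.Dict String (List Int) :=
  (PySem.List.sorted (pvItems tm) (fun p => p.1)).foldl
    (fun d p => d.modify p.2 [] (fun l => l ++ [p.1])) PySem.Dict.empty

-- Source B's inner loop: first position in the (ascending) list that is ≥ cur
def pvFirstGE : List Int → Int → Option Int
  | [], _ => none
  | p :: rest, cur => if cur ≤ p then some p else pvFirstGE rest cur

-- B's loop body for one word: look the word up in the index, take the first position ≥ cursor.
def pvStepB (tm : List (Int × String)) (st : Int × List String) (w : String) : Int × List String :=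
  match pvFirstGE ((pvIndex tm).getD w []) st.1 with
  | some p => (p + 1, st.2 ++ [PySem.Int.toStr p])
  | none   => (pvMaxKey tm + 1, st.2)

def get_indices_from_words_alt (word_string : String) (token_map : List (Int × String)) : String :=
  let words := PySem.Str.split₀ word_string
  if words.isEmpty then "0" else
    let st := words.foldl (pvStepB token_map) (1, [])
    if st.2.isEmpty then "0" else PySem.Str.join " " st.2

-- ===== PRECONDITION & SPEC =====
-- Pre_ excludes only the inputs where A raises: an empty token_map together with a non-empty
-- word list makes A evaluate max() of an empty sequence (ValueError); B raises there too.
def Pre_get_indices_from_words (word_string : String) (token_map : List (Int × String)) : Prop :=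
  PySem.Str.split₀ word_string = [] ∨ token_map ≠ []
instance (word_string : String) (token_map : List (Int × String)) : Decidable (Pre_get_indices_from_words word_string token_map) := by unfold Pre_get_indices_from_words; infer_instance

def pvWitness_get_indices_from_words : String × (List (Int × String)) :=
  ("a b", [(1, "a"), (2, "b")])

def Spec_get_indices_from_words (word_string : String) (token_map : List (Int × String)) (out : String) : Prop := out = get_indices_from_words_alt word_string token_map
instance (word_string : String) (token_map : List (Int × String)) (out : String) : Decidable (Spec_get_indices_from_words word_string token_map out) := by unfold Spec_get_indices_from_words; infer_instance

-- ===== CLAIM (what is proved, stated in full; the proofs are below) =====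
def Claim_equal_get_indices_from_words : Prop := ∀ (word_string : String) (token_map : List (Int × String)), Dom_get_indices_from_words word_string token_map → Pre_get_indices_from_words word_string token_map → Spec_get_indices_from_words word_string token_map (get_indices_from_words word_string token_map)

-- ===== LEMMAS AND PROOFS =====

-- A's scan: either no hit in [cur, mx] (cursor left at max cur (mx+1)), or the least hit p ≥ cur.
theorem pvScanA_spec (tm : List (Int × String)) (mx : Int) (w : String) (cur : Int) :
    (pvScanA tm mx w cur = (max cur (mx + 1), none) ∧
      ∀ q, cur ≤ q → q ≤ mx → (PySem.Dict.mk tm).get? q ≠ some w) ∨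
    (∃ p, pvScanA tm mx w cur = (p + 1, some p) ∧ cur ≤ p ∧ p ≤ mx ∧
      (PySem.Dict.mk tm).get? p = some w ∧
      ∀ q, cur ≤ q → q < p → (PySem.Dict.mk tm).get? q ≠ some w) := by
  rw [pvScanA]
  by_cases h : cur ≤ mx
  · by_cases hg : (PySem.Dict.mk tm).get? cur = some w
    · right
      exact ⟨cur, by simp [h, hg], le_refl _, h, hg, fun q h1 h2 => by omega⟩
    · have ih := pvScanA_spec tm mx w (cur + 1)
      simp only [if_pos h, if_neg hg]
      rcases ih with ⟨heq, hno⟩ | ⟨p, heq, h1, h2, h3, hmin⟩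
      · left
        refine ⟨by rw [heq]; congr 1; omega, fun q hq1 hq2 => ?_⟩
        rcases eq_or_lt_of_le hq1 with rfl | hlt
        · exact hg
        · exact hno q (by omega) hq2
      · right
        refine ⟨p, heq, by omega, h2, h3, fun q hq1 hq2 => ?_⟩
        rcases eq_or_lt_of_le hq1 with rfl | hlt
        · exact hg
        · exact hmin q (by omega) hq2
  · left
    exact ⟨by simp [h]; omega, fun q h1 h2 => by omega⟩
termination_by (mx + 1 - cur).toNat
decreasing_by omega

-- B's scan of an ascending list: none and everything < cur, or the least element ≥ cur.
theorem pvFirstGE_spec : ∀ (L : List Int), L.Pairwise (· < ·) → ∀ cur : Int,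
    (pvFirstGE L cur = none ∧ ∀ q ∈ L, q < cur) ∨
    (∃ p, pvFirstGE L cur = some p ∧ p ∈ L ∧ cur ≤ p ∧ ∀ q ∈ L, q < p → q < cur) := by
  intro L
  induction L with
  | nil => intro _ cur; left; simp [pvFirstGE]
  | cons p rest ih =>
    intro hL cur
    rw [List.pairwise_cons] at hL
    by_cases hc : cur ≤ p
    · right
      refine ⟨p, by simp [pvFirstGE, hc], List.mem_cons_self, hc, fun q hq hlt => ?_⟩
      rcases List.mem_cons.mp hq with rfl | hq'
      · omega
      · exact absurd hlt (not_lt.mpr (le_of_lt (hL.1 q hq')))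
    · rcases ih hL.2 cur with ⟨heq, hall⟩ | ⟨p', heq, hmem, hle, hmin⟩
      · left
        refine ⟨by simp [pvFirstGE, hc, heq], fun q hq => ?_⟩
        rcases List.mem_cons.mp hq with rfl | hq'
        · omega
        · exact hall q hq'
      · right
        refine ⟨p', by simp [pvFirstGE, hc, heq], List.mem_cons_of_mem _ hmem, hle,
          fun q hq hlt => ?_⟩
        rcases List.mem_cons.mp hq with rfl | hq'
        · omega
        · exact hmin q hq' hlt

theorem pvItems_subset : ∀ (tm : List (Int × String)), ∀ x ∈ pvItems tm, x ∈ tm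
  | [] => by intro x hx; simp [pvItems] at hx
  | (k, v) :: rest => by
    intro x hx
    rw [pvItems] at hx
    rcases List.mem_cons.mp hx with rfl | hx'
    · exact List.mem_cons_self
    · exact List.mem_cons_of_mem _
        (List.mem_of_mem_filter (pvItems_subset (rest.filter (fun p => p.1 != k)) x hx'))
termination_by tm => tm.length
decreasing_by simpa using Nat.lt_succ_of_le (List.length_filter_le _ _)

theorem get?_mk_filter_ne (k p : Int) (hne : p ≠ k) : ∀ (rest : List (Int × String)),
    (PySem.Dict.mk (rest.filter (fun q => q.1 != k))).get? p = (PySem.Dict.mk rest).get? p := by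
  intro rest
  induction rest with
  | nil => rfl
  | cons a rest ih =>
    obtain ⟨a1, a2⟩ := a
    by_cases hk : a1 = k
    · rw [List.filter_cons_of_neg (by simp [hk])]
      rw [ih, PySem.Dict.get?_mk_cons]
      have hb : (a1 == p) = false := by simp; omega
      simp [hb]
    · rw [List.filter_cons_of_pos (by simp [hk])]
      rw [PySem.Dict.get?_mk_cons, PySem.Dict.get?_mk_cons, ih]

theorem pvItems_mem : ∀ (tm : List (Int × String)) (p : Int) (v : String),
    (p, v) ∈ pvItems tm ↔ (PySem.Dict.mk tm).get? p = some v
  | [] => by intro p v; simp [pvItems, PySem.Dict.get?]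
  | (k, w) :: rest => by
    intro p v
    rw [pvItems, PySem.Dict.get?_mk_cons]
    have hnotin : ∀ v' : String, (k, v') ∉ pvItems (rest.filter (fun q => q.1 != k)) := by
      intro v' hmem
      have h2 := (List.mem_filter.mp (pvItems_subset _ _ hmem)).2
      simp at h2
    by_cases hp : k = p
    · subst hp
      simp only [beq_self_eq_true, if_true]
      constructor
      · intro h
        rcases List.mem_cons.mp h with heq | hmem
        · injection heq with _ h2; rw [h2]
        · exact absurd hmem (hnotin v)
      · intro h
        injection h with h2
        exact List.mem_cons.mpr (Or.inl (by rw [h2]))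
    · have hb : (k == p) = false := by simp; omega
      simp only [hb, Bool.false_eq_true, if_false]
      rw [← get?_mk_filter_ne k p (fun h => hp h.symm) rest,
        ← pvItems_mem (rest.filter (fun q => q.1 != k)) p v]
      constructor
      · intro h
        rcases List.mem_cons.mp h with heq | hmem
        · exact absurd (by injection heq with h1 _; exact h1.symm) hp
        · exact hmem
      · exact fun h => List.mem_cons.mpr (Or.inr h)
termination_by tm => tm.length
decreasing_by all_goals simpa using Nat.lt_succ_of_le (List.length_filter_le _ _)

theorem pvItems_keys_nodup : ∀ (tm : List (Int × String)), ((pvItems tm).map (·.1)).Nodup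
  | [] => by simp [pvItems]
  | (k, v) :: rest => by
    rw [pvItems]
    simp only [List.map_cons, List.nodup_cons]
    refine ⟨fun hmem => ?_, pvItems_keys_nodup (rest.filter (fun p => p.1 != k))⟩
    rcases List.mem_map.mp hmem with ⟨⟨p, w⟩, hpw, hk⟩
    have h2 := (List.mem_filter.mp (pvItems_subset _ _ hpw)).2
    simp at h2 hk
    omega
termination_by tm => tm.length
decreasing_by simpa using Nat.lt_succ_of_le (List.length_filter_le _ _)

-- the per-word position list B consults
theorem pvPos_eq (tm : List (Int × String)) (w : String) :
    (pvIndex tm).getD w [] = ((PySem.List.sorted (pvItems tm) (fun p => p.1)).filter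
      (fun p => p.2 == w)).map (·.1) := by
  unfold pvIndex
  rw [show (PySem.List.sorted (pvItems tm) (fun p => p.1)).foldl
        (fun d p => d.modify p.2 [] (fun l => l ++ [p.1])) PySem.Dict.empty
      = ((PySem.List.sorted (pvItems tm) (fun p => p.1)).map (fun p => (p.2, p.1))).foldl
        (fun d q => d.modify q.1 [] (fun l => l ++ [q.2])) PySem.Dict.empty
    by rw [List.foldl_map]]
  rw [PySem.Dict.getD_foldl_modify_append]
  simp [List.filter_map, List.map_map, Function.comp_def]

theorem pvPos_mem (tm : List (Int × String)) (w : String) (p : Int) :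
    p ∈ (pvIndex tm).getD w [] ↔ (PySem.Dict.mk tm).get? p = some w := by
  rw [pvPos_eq]
  constructor
  · intro hp
    rcases List.mem_map.mp hp with ⟨⟨q, v⟩, hq, rfl⟩
    have h2 := List.mem_filter.mp hq
    have hv : v = w := by simpa using h2.2
    subst hv
    exact (pvItems_mem tm q v).mp ((PySem.List.sorted_perm _ _ _).mem_iff.mp h2.1)
  · intro h
    refine List.mem_map.mpr ⟨(p, w), List.mem_filter.mpr ⟨?_, by simp⟩, rfl⟩
    exact (PySem.List.sorted_perm _ _ _).mem_iff.mpr ((pvItems_mem tm p w).mpr h)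

theorem pvPos_sorted (tm : List (Int × String)) (w : String) :
    ((pvIndex tm).getD w []).Pairwise (· < ·) := by
  rw [pvPos_eq]
  rw [List.pairwise_map]
  have h1 : (PySem.List.sorted (pvItems tm) (fun p => p.1)).Pairwise (fun a b => a.1 ≤ b.1) :=
    PySem.List.sorted_pairwise _ _
  have h2 : ((PySem.List.sorted (pvItems tm) (fun p => p.1)).map (·.1)).Nodup :=
    ((PySem.List.sorted_perm (pvItems tm) (fun p => p.1) false).map (·.1)).nodup_iff.mpr
      (pvItems_keys_nodup tm)
  have h3 : (PySem.List.sorted (pvItems tm) (fun p => p.1)).Pairwise (fun a b => a.1 ≠ b.1) :=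
    List.pairwise_map.mp h2
  have h4 : (PySem.List.sorted (pvItems tm) (fun p => p.1)).Pairwise (fun a b => a.1 < b.1) :=
    (h1.and h3).imp (fun ⟨hle, hne⟩ => lt_of_le_of_ne hle hne)
  exact h4.sublist List.filter_sublist

theorem le_maxKey (tm : List (Int × String)) (p : Int) (w : String)
    (h : (PySem.Dict.mk tm).get? p = some w) : p ≤ pvMaxKey tm := by
  have hmem : p ∈ (PySem.Dict.mk tm).keys := by
    by_contra hn
    rw [← PySem.Dict.get?_eq_none_iff_not_mem_keys] at hn
    rw [h] at hn
    simp at hn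
  unfold pvMaxKey
  cases hmax : PySem.List.max? (PySem.Dict.mk tm).keys (fun x => x) with
  | none =>
    rw [PySem.List.max?_eq_none_iff] at hmax
    rw [hmax] at hmem
    exact absurd hmem (List.not_mem_nil)
  | some m =>
    simpa using PySem.List.max?_isMax hmax p hmem

-- the cursor invariant: equal, or both already past every key
def pvInv (tm : List (Int × String)) (curA curB : Int) : Prop :=
  curA = curB ∨ (pvMaxKey tm < curA ∧ pvMaxKey tm < curB)

-- one word: the two loop bodies append the same output and preserve the invariant
theorem pvStep_eq (tm : List (Int × String)) (w : String) (curA curB : Int)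
    (acc : List String) (hInv : pvInv tm curA curB) :
    (pvStepA tm (curA, acc) w).2 = (pvStepB tm (curB, acc) w).2 ∧
    pvInv tm (pvStepA tm (curA, acc) w).1 (pvStepB tm (curB, acc) w).1 := by
  have hsorted := pvPos_sorted tm w
  rcases hInv with rfl | ⟨hA, hB⟩
  · -- equal cursors
    rcases pvScanA_spec tm (pvMaxKey tm) w curA with ⟨heqA, hno⟩ | ⟨p, heqA, h1, h2, h3, hmin⟩
    · -- A finds nothing in [cur, mx]
      have hgeq : pvFirstGE ((pvIndex tm).getD w []) curA = none := by
        rcases pvFirstGE_spec _ hsorted curA with ⟨heq, _⟩ | ⟨p, heq, hmem, hle, _⟩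
        · exact heq
        · exfalso
          have hget := (pvPos_mem tm w p).mp hmem
          exact hno p hle (le_maxKey tm p w hget) hget
      constructor
      · simp [pvStepA, pvStepB, heqA, hgeq]
      · simp only [pvStepA, pvStepB, heqA, hgeq]
        right
        exact ⟨by omega, by omega⟩
    · -- A finds the least hit p ≥ cur; B finds the same p
      have hgeq : pvFirstGE ((pvIndex tm).getD w []) curA = some p := by
        rcases pvFirstGE_spec _ hsorted curA with ⟨heq, hall⟩ | ⟨p', heq, hmem, hle, hminB⟩
        · exfalso
          exact absurd (hall p ((pvPos_mem tm w p).mpr h3)) (not_lt.mpr h1)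
        · have hp' : (PySem.Dict.mk tm).get? p' = some w := (pvPos_mem tm w p').mp hmem
          rcases lt_trichotomy p' p with hlt | rfl | hgt
          · exact absurd hp' (hmin p' hle hlt)
          · exact heq
          · exact absurd (hminB p ((pvPos_mem tm w p).mpr h3) hgt) (not_lt.mpr h1)
      constructor
      · simp [pvStepA, pvStepB, heqA, hgeq]
      · simp only [pvStepA, pvStepB, heqA, hgeq]
        left; rfl
  · -- both cursors are past every key: neither side finds anything
    have hnoA : pvScanA tm (pvMaxKey tm) w curA = (max curA (pvMaxKey tm + 1), none) := by
      rcases pvScanA_spec tm (pvMaxKey tm) w curA with ⟨heq, _⟩ | ⟨p, _, h1, h2, _, _⟩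
      · exact heq
      · omega
    have hnoB : pvFirstGE ((pvIndex tm).getD w []) curB = none := by
      rcases pvFirstGE_spec _ hsorted curB with ⟨heq, _⟩ | ⟨p, heq, hmem, hle, _⟩
      · exact heq
      · have := le_maxKey tm p w ((pvPos_mem tm w p).mp hmem)
        omega
    constructor
    · simp [pvStepA, pvStepB, hnoA, hnoB]
    · simp only [pvStepA, pvStepB, hnoA, hnoB]
      right
      exact ⟨by omega, by omega⟩

theorem pvFold_eq (tm : List (Int × String)) : ∀ (ws : List String) (curA curB : Int)
    (acc : List String), pvInv tm curA curB →
    (ws.foldl (pvStepA tm) (curA, acc)).2 = (ws.foldl (pvStepB tm) (curB, acc)).2 := by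
  intro ws
  induction ws with
  | nil => intro curA curB acc _; rfl
  | cons w ws ih =>
    intro curA curB acc hInv
    obtain ⟨hacc, hInv'⟩ := pvStep_eq tm w curA curB acc hInv
    simp only [List.foldl_cons]
    rw [show pvStepA tm (curA, acc) w = ((pvStepA tm (curA, acc) w).1, (pvStepA tm (curA, acc) w).2) from rfl,
        show pvStepB tm (curB, acc) w = ((pvStepB tm (curB, acc) w).1, (pvStepB tm (curB, acc) w).2) from rfl,
        hacc]
    exact ih _ _ _ hInv'

-- ===== VERDICT (by name: the statement is the Claim_ definition above) =====
theorem get_indices_from_words_spec : Claim_equal_get_indices_from_words := by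
  intro ws tm _ _
  unfold Spec_get_indices_from_words get_indices_from_words get_indices_from_words_alt
  cases hw : (PySem.Str.split₀ ws).isEmpty
  · simp only [hw, Bool.false_eq_true, if_false]
    rw [pvFold_eq tm (PySem.Str.split₀ ws) 1 1 [] (Or.inl rfl)]
    rcases hL : ((PySem.Str.split₀ ws).foldl (pvStepB tm) (1, [])).2 with _ | ⟨x, l⟩ <;> simp
  · rw [List.isEmpty_iff] at hw
    simp [hw]
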